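-- pv_equiv track=rewrite | github.com/Fondamenti18/fondamenti-di-programmazione | students/1751097/homework05/program02.py | split_straight_lines
-- ===== SOURCE A (Python) =====
-- def split_straight_lines(path):
--     result = []
--
--     line_start = path.pop()
--     prev = line_start
--     dprev = None
--
--     while len(path) > 0:
--         nxt = path.pop()
--         d = diff(nxt, prev)
--         if dprev is None: dprev = d
--         if d != dprev:
--             result.append((line_start, prev))
--             line_start = prev
--             dprev = d
--         prev = nxt
--
--     result.append((line_start, prev))
--
--     return result
--
-- def diff(c1, c2):
--     return (c1[0] - c2[0], c1[1] - c2[1])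
-- ===== SOURCE B (Python) =====
-- def split_straight_lines(path):
--     # Same side effect as the original: path is emptied. Empty path returns [] (original raises IndexError; excluded by Pre_).
--     pts = [path.pop() for _ in range(len(path))]  # reversed processing order, empties path
--     if len(pts) <= 1:
--         return [(p, p) for p in pts]
--     deltas = [(x2 - x1, y2 - y1) for (x1, y1), (x2, y2) in zip(pts, pts[1:])]
--     result = []
--     start, end = pts[0], pts[1]
--     for d_prev, d, p in zip(deltas, deltas[1:], pts[2:]):
--         if d != d_prev:
--             result.append((start, end))
--             start = end
--         end = p
--     result.append((start, end))
--     return result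
-- ===== Notes on version B (the rewrite author's own statement) =====
-- stated objective: alternative
-- what changed: B first materialises the reversed point list and the list of consecutive deltas, then groups maximal runs by scanning a zip of adjacent deltas, instead of A's single pop-loop that recomputes and threads the previous delta through an Optional sentinel.
-- outside the precondition, e.g. on split_straight_lines([]): A raises IndexError, B returns []
import Mathlib
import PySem

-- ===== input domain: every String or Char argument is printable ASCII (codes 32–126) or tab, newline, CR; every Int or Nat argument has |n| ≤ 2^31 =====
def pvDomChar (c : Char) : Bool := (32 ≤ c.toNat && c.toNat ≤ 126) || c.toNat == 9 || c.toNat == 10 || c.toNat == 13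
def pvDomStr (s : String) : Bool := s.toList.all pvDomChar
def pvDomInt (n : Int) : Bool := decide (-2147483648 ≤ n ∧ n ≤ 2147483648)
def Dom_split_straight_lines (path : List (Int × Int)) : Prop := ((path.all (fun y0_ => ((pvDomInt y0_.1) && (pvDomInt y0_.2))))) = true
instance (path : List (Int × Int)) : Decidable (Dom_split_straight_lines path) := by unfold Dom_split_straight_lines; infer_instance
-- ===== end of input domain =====

-- B splits the path via a precomputed delta list grouped by a zip of adjacent deltas (same values, same emptying
-- side effect on `path`); objective: alternative decomposition, not faster. Equivalence is about the return value.

-- ===== PORT A =====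
-- diff(c1, c2)
def pvDiffAB (c1 c2 : Int × Int) : Int × Int := (c1.1 - c2.1, c1.2 - c2.2)

-- the while-loop: successive path.pop() visits path back-to-front, so we recurse over path.reverse's tail
def splitA_loop : List (Int × Int) → (Int × Int) → (Int × Int) → Option (Int × Int) →
    List ((Int × Int) × (Int × Int)) → List ((Int × Int) × (Int × Int))
  | [], line_start, prev, _, result => result ++ [(line_start, prev)]
  | nxt :: rest, line_start, prev, dprev, result =>
      let d := pvDiffAB nxt prev
      let dp := dprev.getD d            -- "if dprev is None: dprev = d"
      if d ≠ dp then
        splitA_loop rest prev nxt (some d) (result ++ [(line_start, prev)])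
      else
        splitA_loop rest line_start nxt (some dp) result

def split_straight_lines (path : List (Int × Int)) : List ((Int × Int) × (Int × Int)) :=
  match path.reverse with
  | [] => []                            -- Python raises IndexError on path.pop(); excluded by Pre_
  | line_start :: rest => splitA_loop rest line_start line_start none []

-- ===== PORT B =====
-- deltas = [(x2-x1, y2-y1) for (x1,y1),(x2,y2) in zip(pts, pts[1:])]
def pvDeltasB (pts : List (Int × Int)) : List (Int × Int) :=
  (pts.zip pts.tail).map (fun q => (q.2.1 - q.1.1, q.2.2 - q.1.2))

-- one step of the for-loop over zip(deltas, deltas[1:], pts[2:]); state = (result, start, end)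
def pvStepB (st : List ((Int × Int) × (Int × Int)) × (Int × Int) × (Int × Int))
    (t : (Int × Int) × (Int × Int) × (Int × Int)) :
    List ((Int × Int) × (Int × Int)) × (Int × Int) × (Int × Int) :=
  if t.2.1 ≠ t.1 then (st.1 ++ [(st.2.1, st.2.2)], st.2.2, t.2.2) else (st.1, st.2.1, t.2.2)

def split_straight_lines_alt (path : List (Int × Int)) : List ((Int × Int) × (Int × Int)) :=
  let pts := path.reverse               -- pts = [path.pop() for _ in range(len(path))]
  match pts with                        -- "if len(pts) <= 1: return [(p, p) for p in pts]"
  | [] => []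
  | [p] => [(p, p)]
  | p0 :: p1 :: _ =>
    let deltas := pvDeltasB pts
    let st := (deltas.zip (deltas.tail.zip (pts.drop 2))).foldl pvStepB ([], p0, p1)
    st.1 ++ [(st.2.1, st.2.2)]

-- ===== PRECONDITION & SPEC =====
-- Pre_ excludes only the empty path, on which A raises IndexError (path.pop() on []).
def Pre_split_straight_lines (path : List (Int × Int)) : Prop := path ≠ []
instance (path : List (Int × Int)) : Decidable (Pre_split_straight_lines path) := by
  unfold Pre_split_straight_lines; infer_instance
def pvWitness_split_straight_lines : (List (Int × Int)) := [(0, 0), (1, 0), (2, 1)]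

def Spec_split_straight_lines (path : List (Int × Int)) (out : List ((Int × Int) × (Int × Int))) : Prop := out = split_straight_lines_alt path
instance (path : List (Int × Int)) (out : List ((Int × Int) × (Int × Int))) : Decidable (Spec_split_straight_lines path out) := by unfold Spec_split_straight_lines; infer_instance

-- ===== CLAIM (what is proved, stated in full; the proofs are below) =====
def Claim_equal_split_straight_lines : Prop := ∀ (path : List (Int × Int)), Dom_split_straight_lines path → Pre_split_straight_lines path → Spec_split_straight_lines path (split_straight_lines path)

-- ===== LEMMAS AND PROOFS =====

-- the core invariant: B's fold over zip(dp::ds, zip(ds, rest)) finished with the final append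
-- equals A's loop entered with dprev = some dp
theorem splitB_fold_eq (rest : List (Int × Int)) :
    ∀ (prev dp start : Int × Int) (acc : List ((Int × Int) × (Int × Int))),
    (let ds := pvDeltasB (prev :: rest)
     let st := ((dp :: ds).zip (ds.zip rest)).foldl pvStepB (acc, start, prev)
     st.1 ++ [(st.2.1, st.2.2)])
      = splitA_loop rest start prev (some dp) acc := by
  induction rest with
  | nil =>
      intro prev dp start acc
      simp [pvDeltasB, splitA_loop]
  | cons p rs ih =>
      intro prev dp start acc
      have hds : pvDeltasB (prev :: p :: rs)
          = (p.1 - prev.1, p.2 - prev.2) :: pvDeltasB (p :: rs) := by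
        simp [pvDeltasB]
      simp only [hds, List.zip_cons_cons, List.foldl_cons]
      by_cases h : (p.1 - prev.1, p.2 - prev.2) = dp
      · have hstep : pvStepB (acc, start, prev) (dp, (p.1 - prev.1, p.2 - prev.2), p)
            = (acc, start, p) := by
          simp [pvStepB, h]
        rw [hstep]
        have := ih p (p.1 - prev.1, p.2 - prev.2) start acc
        simp only at this
        rw [this]
        simp [splitA_loop, pvDiffAB, h]
      · have hstep : pvStepB (acc, start, prev) (dp, (p.1 - prev.1, p.2 - prev.2), p)
            = (acc ++ [(start, prev)], prev, p) := by
          simp [pvStepB, h]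
        rw [hstep]
        have := ih p (p.1 - prev.1, p.2 - prev.2) prev (acc ++ [(start, prev)])
        simp only at this
        rw [this]
        simp [splitA_loop, pvDiffAB, h]

-- ===== VERDICT (by name: the statement is the Claim_ definition above) =====
theorem split_straight_lines_spec : Claim_equal_split_straight_lines := by
  intro path _ hpre
  unfold Spec_split_straight_lines split_straight_lines split_straight_lines_alt
  have hrev : path.reverse ≠ [] := by
    simpa using hpre
  cases hr : path.reverse with
  | nil => exact absurd hr hrev
  | cons p0 tl =>
    cases tl with
    | nil => simp [splitA_loop]
    | cons p1 rest =>
      -- first loop iteration of A: dprev = None, so d = dprev and no split happens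
      have hA : splitA_loop (p1 :: rest) p0 p0 none []
          = splitA_loop rest p0 p1 (some (pvDiffAB p1 p0)) [] := by
        simp [splitA_loop]
      have hds : pvDeltasB (p0 :: p1 :: rest)
          = (p1.1 - p0.1, p1.2 - p0.2) :: pvDeltasB (p1 :: rest) := by
        simp [pvDeltasB]
      have hB := splitB_fold_eq rest p1 (p1.1 - p0.1, p1.2 - p0.2) p0 []
      simp only at hB
      simp only [hA, hds, List.tail_cons, List.drop_succ_cons, List.drop_zero]
      rw [hB]
      rfl
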